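-- pv_equiv track=rewrite | github.com/punkdit/bruhat | bruhat/hyperbolic.py | reduce_word
-- ===== SOURCE A (Python) =====
-- def reduce_word(_rels, word):
--     rels = []
--     for rel in _rels:
--         for i in range(len(rel)):
--             r = rel[i:] + rel[:i] # cyclic permutation
--             rels.append(r)
--     done = False
--     while not done:
--         done = True
--         n = len(word)
--         for i in range(n):
--             for rel in rels:
--                 m = len(rel)
--                 if word[i:i+m] == rel:
--                     word = word[:i] + word[i+m:]
--                     done = False
--                     break
--             else:
--                 continue
--             break
--     return word
-- ===== SOURCE B (Python) =====
-- def reduce_word(_rels, word):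
--     # No rotation list: a length-m slice matches some cyclic permutation of rel
--     # iff it is a substring of rel+rel. Scan with a pointer that, after a
--     # deletion, backs up only M-1 places instead of restarting from 0.
--     doubles = [(rel + rel, len(rel)) for rel in _rels if rel]
--     M = max((m for _, m in doubles), default=0)
--     i = 0
--     while i < len(word):
--         for dd, m in doubles:
--             if i + m <= len(word) and word[i:i + m] in dd:
--                 word = word[:i] + word[i + m:]
--                 i = max(i - M + 1, 0)
--                 break
--         else:
--             i += 1
--     return word
-- ===== Notes on version B (the rewrite author's own statement) =====
-- stated objective: faster
-- what changed: B never materialises the cyclic rotations (a length-m slice matches one iff it is a substring of rel+rel) and scans with a pointer that, after a deletion, backs up only M-1 places instead of A's restart-from-0 rescans.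
import Mathlib
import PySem

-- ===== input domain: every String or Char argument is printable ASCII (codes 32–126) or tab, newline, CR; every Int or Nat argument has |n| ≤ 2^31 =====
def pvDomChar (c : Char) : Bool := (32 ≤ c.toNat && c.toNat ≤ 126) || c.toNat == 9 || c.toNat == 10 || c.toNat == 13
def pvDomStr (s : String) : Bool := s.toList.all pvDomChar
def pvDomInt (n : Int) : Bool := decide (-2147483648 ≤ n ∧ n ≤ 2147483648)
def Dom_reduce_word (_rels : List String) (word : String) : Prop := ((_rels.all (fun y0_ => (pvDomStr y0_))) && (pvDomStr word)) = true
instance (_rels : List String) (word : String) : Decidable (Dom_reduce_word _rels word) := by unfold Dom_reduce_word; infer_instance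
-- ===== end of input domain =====

-- B never materialises the cyclic rotations (a slice matches one iff it is a substring of
-- rel+rel) and resumes its scan near the deletion point instead of restarting at 0; the
-- timing run reports it measurably faster.

-- ===== PORT A =====
-- rels = [] ; for rel in _rels: for i in range(len(rel)): rels.append(rel[i:] + rel[:i])
def pvRelsA (_rels : List String) : List (List Char) :=
  _rels.foldl (fun acc rel =>
    (List.range rel.toList.length).foldl
      (fun acc2 i => acc2 ++ [rel.toList.drop i ++ rel.toList.take i]) acc) []

-- one pass of A's `for i in range(n): for rel in rels: if word[i:i+m] == rel: …` —
-- returns the word after the first (leftmost, first-rel) deletion, or none if no match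
def pvPassA (rels : List (List Char)) (w : List Char) (i : Nat) : Option (List Char) :=
  if _h : i < w.length then
    match rels.find? (fun rel => ((w.drop i).take rel.length == rel)) with
    | some rel => some (w.take i ++ w.drop (i + rel.length))
    | none => pvPassA rels w (i + 1)
  else none
termination_by w.length - i
decreasing_by omega

-- `while not done:` — each successful pass deletes at least one character, so
-- length+1 passes always suffice (every cyclic rotation in rels is nonempty)
def pvLoopA (rels : List (List Char)) : Nat → List Char → List Char
  | 0, w => w
  | fuel + 1, w =>
    match pvPassA rels w 0 with
    | none => w
    | some w' => pvLoopA rels fuel w'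

def reduce_word (_rels : List String) (word : String) : String :=
  let rels := pvRelsA _rels
  String.ofList (pvLoopA rels (word.toList.length + 1) word.toList)

-- ===== PORT B =====
-- doubles = [(rel + rel, len(rel)) for rel in _rels if rel]
def pvDoubles (_rels : List String) : List (List Char × Nat) :=
  (_rels.filter (fun rel => !rel.toList.isEmpty)).map
    (fun rel => (rel.toList ++ rel.toList, rel.toList.length))

-- M = max((m for _, m in doubles), default=0)
def pvMaxM (ds : List (List Char × Nat)) : Nat :=
  ds.foldl (fun a dm => max a dm.2) 0

-- while i < len(word): for dd, m in doubles: if i+m <= len(word) and word[i:i+m] in dd: …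
-- (`in` on strings is PySem.Chars.isIn). Each step either advances i or shortens the word
-- by ≥ 1 while i moves back ≤ M-1, so len*(M+1)+1 steps always suffice (fuel; the
-- equivalence theorem below shows it is never exhausted)
def pvLoopB (ds : List (List Char × Nat)) (M : Nat) : Nat → List Char → Nat → List Char
  | 0, w, _ => w
  | fuel + 1, w, i =>
    if i < w.length then
      match ds.find? (fun dm =>
          decide (i + dm.2 ≤ w.length) && PySem.Chars.isIn ((w.drop i).take dm.2) dm.1) with
      | none => pvLoopB ds M fuel w (i + 1)
      | some dm => pvLoopB ds M fuel (w.take i ++ w.drop (i + dm.2)) (i + 1 - M)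
    else w

def reduce_word_alt (_rels : List String) (word : String) : String :=
  let ds := pvDoubles _rels
  let M := pvMaxM ds
  String.ofList (pvLoopB ds M (word.toList.length * (M + 1) + 1) word.toList 0)

-- ===== PRECONDITION & SPEC =====
def Spec_reduce_word (_rels : List String) (word : String) (out : String) : Prop := out = reduce_word_alt _rels word
instance (_rels : List String) (word : String) (out : String) : Decidable (Spec_reduce_word _rels word out) := by unfold Spec_reduce_word; infer_instance

-- ===== CLAIM (what is proved, stated in full; the proofs are below) =====
def Claim_equal_reduce_word : Prop := ∀ (_rels : List String) (word : String), Dom_reduce_word _rels word → Spec_reduce_word _rels word (reduce_word _rels word)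

-- ===== LEMMAS AND PROOFS =====

-- proof-layer name for A's rotation block of one relation
def pvRots (rel : List Char) : List (List Char) :=
  (List.range rel.length).map (fun i => rel.drop i ++ rel.take i)

-- A's slice comparison word[i:i+m] == rel equals a prefix test on the dropped word
lemma pvPred_eq (w : List Char) (i : Nat) :
    (fun rel : List Char => ((w.drop i).take rel.length == rel))
      = (fun r : List Char => r.isPrefixOf (w.drop i)) := by
  funext r
  rw [Bool.eq_iff_iff]
  simp only [beq_iff_eq, List.isPrefixOf_iff_prefix, List.prefix_iff_eq_take]
  exact eq_comm

-- a rotation is a window of the doubled relation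
lemma pvRot_eq (rel : List Char) (i : Nat) (hi : i < rel.length) :
    rel.drop i ++ rel.take i = ((rel ++ rel).drop i).take rel.length := by
  rw [List.drop_append_of_le_length (le_of_lt hi), List.take_append,
      show (rel.drop i).take rel.length = rel.drop i from List.take_of_length_le (by simp),
      show rel.length - (rel.drop i).length = i from by rw [List.length_drop]; omega]

lemma pvRelsA_flat (_rels : List String) :
    pvRelsA _rels = _rels.flatMap (fun rel => pvRots rel.toList) := by
  unfold pvRelsA pvRots
  have h1 : (fun (acc : List (List Char)) (rel : String) =>
      (List.range rel.toList.length).foldl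
        (fun acc2 i => acc2 ++ [rel.toList.drop i ++ rel.toList.take i]) acc)
      = (fun acc rel => acc ++
        (List.range rel.toList.length).map
          (fun i => rel.toList.drop i ++ rel.toList.take i)) := by
    funext acc rel
    exact PySem.List.foldl_append_singleton_eq_map _ _ _
  rw [h1, ← List.flatMap_eq_foldl]

-- every rotation is nonempty
lemma pvFlat_pos (_rels : List String) :
    ∀ r ∈ _rels.flatMap (fun rel => pvRots rel.toList), 1 ≤ r.length := by
  intro r hr
  simp only [List.mem_flatMap, pvRots, List.mem_map, List.mem_range] at hr
  obtain ⟨rel, -, i, hi, rfl⟩ := hr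
  simp only [List.length_append, List.length_drop, List.length_take]
  omega

lemma pvMaxM_le (ds : List (List Char × Nat)) : ∀ dm ∈ ds, dm.2 ≤ pvMaxM ds := by
  unfold pvMaxM
  have aux : ∀ (l : List (List Char × Nat)) (init : Nat),
      init ≤ l.foldl (fun a dm => max a dm.2) init ∧
      ∀ dm ∈ l, dm.2 ≤ l.foldl (fun a dm => max a dm.2) init := by
    intro l
    induction l with
    | nil => simp
    | cons x xs ih =>
      intro init
      refine ⟨le_trans (le_max_left _ _) (ih (max init x.2)).1, ?_⟩
      intro dm hdm
      rcases List.mem_cons.mp hdm with h | h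
      · subst h
        exact le_trans (le_max_right _ _) (ih (max init dm.2)).1
      · exact (ih (max init x.2)).2 dm h
  exact (aux ds 0).2

-- every rotation's length is bounded by B's M
lemma pvFlat_le (_rels : List String) :
    ∀ r ∈ _rels.flatMap (fun rel => pvRots rel.toList),
      r.length ≤ pvMaxM (pvDoubles _rels) := by
  intro r hr
  simp only [List.mem_flatMap, pvRots, List.mem_map, List.mem_range] at hr
  obtain ⟨rel, hrel, i, hi, rfl⟩ := hr
  have hmem : (rel.toList ++ rel.toList, rel.toList.length) ∈ pvDoubles _rels := by
    unfold pvDoubles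
    exact List.mem_map.mpr ⟨rel, List.mem_filter.mpr ⟨hrel, by
      simp only [Bool.not_eq_eq_eq_not, Bool.not_true, List.isEmpty_eq_false_iff]
      intro h
      rw [h] at hi
      simp at hi⟩, rfl⟩
  have := pvMaxM_le (pvDoubles _rels) _ hmem
  simp only [List.length_append, List.length_drop, List.length_take] at *
  omega

-- an infix occurrence is a window
lemma pvInfix_window (s l : List Char) (h : s <:+: l) :
    ∃ k, k + s.length ≤ l.length ∧ s = (l.drop k).take s.length := by
  obtain ⟨t, u, rfl⟩ := h
  refine ⟨t.length, by simp, ?_⟩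
  rw [List.append_assoc, List.drop_left, List.take_append,
      show s.take s.length = s from List.take_length .., ]
  simp

-- a length-m substring of rel+rel is a cyclic rotation of rel
lemma pvSlice_mem_rots (rel s : List Char) (hm : 1 ≤ rel.length)
    (hlen : s.length = rel.length) (h : s <:+: (rel ++ rel)) : s ∈ pvRots rel := by
  obtain ⟨k, hk, hs⟩ := pvInfix_window s (rel ++ rel) h
  rw [hlen] at hs
  simp only [List.length_append] at hk
  by_cases hkm : k < rel.length
  · exact List.mem_map.mpr ⟨k, List.mem_range.mpr hkm, by rw [pvRot_eq rel k hkm, hs]⟩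
  · have hk' : k = rel.length := by omega
    subst hk'
    rw [List.drop_left, List.take_length] at hs
    refine List.mem_map.mpr ⟨0, List.mem_range.mpr (by omega), ?_⟩
    simpa using hs.symm

-- the ordered first-match over rotation blocks extracts the same deletion length as
-- the ordered first-match over doubled relations
lemma pvFind_eq (_rels : List String) (w : List Char) (i : Nat) :
    ((_rels.flatMap (fun rel => pvRots rel.toList)).find?
        (fun r => r.isPrefixOf (w.drop i))).map List.length
      = ((pvDoubles _rels).find? (fun dm =>
          decide (i + dm.2 ≤ w.length) && PySem.Chars.isIn ((w.drop i).take dm.2) dm.1)).map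
            Prod.snd := by
  induction _rels with
  | nil => rfl
  | cons rel ls ih =>
    rw [List.flatMap_cons, List.find?_append]
    unfold pvDoubles
    rw [List.filter_cons]
    by_cases hE : rel.toList.isEmpty
    · have hnil : rel.toList = [] := List.isEmpty_iff.mp hE
      have hrots : pvRots rel.toList = [] := by simp [pvRots, hnil]
      rw [hrots, if_neg (by simp [hE])]
      simpa [pvDoubles] using ih
    · have hne : rel.toList ≠ [] := by simpa [List.isEmpty_iff] using hE
      have hm : 1 ≤ rel.toList.length := List.length_pos_iff.mpr hne
      rw [if_pos (by simp [hE]), List.map_cons]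
      cases hblk : (pvRots rel.toList).find? (fun r => r.isPrefixOf (w.drop i)) with
      | some r =>
        have hrmem := List.mem_of_find?_eq_some hblk
        have hpre : r.isPrefixOf (w.drop i) = true := by
          simpa using @List.find?_some _ (fun r : List Char => r.isPrefixOf (w.drop i))
            r (pvRots rel.toList) hblk
        have hrlen : r.length = rel.toList.length := by
          simp only [pvRots, List.mem_map, List.mem_range] at hrmem
          obtain ⟨j, hj, rfl⟩ := hrmem
          simp only [List.length_append, List.length_drop, List.length_take]
          omega
        rw [List.isPrefixOf_iff_prefix] at hpre
        have hle : i + rel.toList.length ≤ w.length := by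
          have := hpre.length_le
          rw [hrlen, List.length_drop] at this
          omega
        have hslice : (w.drop i).take rel.toList.length = r := by
          rw [← hrlen]
          exact (List.prefix_iff_eq_take.mp hpre).symm
        have hinf : r <:+: (rel.toList ++ rel.toList) := by
          simp only [pvRots, List.mem_map, List.mem_range] at hrmem
          obtain ⟨j, hj, rfl⟩ := hrmem
          refine ⟨rel.toList.take j, rel.toList.drop j, ?_⟩
          rw [← List.append_assoc, List.take_append_drop, List.append_assoc,
              List.take_append_drop]
        have hpB : (decide (i + rel.toList.length ≤ w.length) &&
            PySem.Chars.isIn ((w.drop i).take rel.toList.length)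
              (rel.toList ++ rel.toList)) = true := by
          rw [Bool.and_eq_true, decide_eq_true_iff]
          exact ⟨hle, by rw [hslice]; exact (PySem.Chars.isIn_iff_infix _ _).mpr hinf⟩
        rw [List.find?_cons]
        dsimp only
        rw [hpB]
        simp [hrlen]
      | none =>
        have hpB : (decide (i + rel.toList.length ≤ w.length) &&
            PySem.Chars.isIn ((w.drop i).take rel.toList.length)
              (rel.toList ++ rel.toList)) = false := by
          by_contra hcon
          rw [Bool.not_eq_false, Bool.and_eq_true, decide_eq_true_iff] at hcon
          obtain ⟨h1, h2⟩ := hcon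
          set s := (w.drop i).take rel.toList.length with hs
          have hslen : s.length = rel.toList.length := by
            simp only [hs, List.length_take, List.length_drop]
            omega
          have hmem : s ∈ pvRots rel.toList :=
            pvSlice_mem_rots rel.toList s hm hslen ((PySem.Chars.isIn_iff_infix _ _).mp h2)
          have hpre : s.isPrefixOf (w.drop i) := by
            rw [List.isPrefixOf_iff_prefix, List.prefix_iff_eq_take, hslen]
          exact (List.find?_eq_none.mp hblk s hmem) hpre
        rw [List.find?_cons]
        dsimp only
        rw [hpB]
        simpa [pvDoubles] using ih

-- A's pass returns none when no position matches
lemma pvPassA_none (rels : List (List Char)) (w : List Char)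
    (hnone : ∀ j, j < w.length → rels.find? (fun x => x.isPrefixOf (w.drop j)) = none) :
    ∀ d k, w.length - k ≤ d → pvPassA rels w k = none := by
  intro d
  induction d with
  | zero =>
    intro k hd
    rw [pvPassA, dif_neg (by omega)]
  | succ d ih =>
    intro k hd
    by_cases h : k < w.length
    · rw [pvPassA, dif_pos h, pvPred_eq, hnone k h]
      exact ih (k + 1) (by omega)
    · rw [pvPassA, dif_neg h]

-- A's pass finds exactly the leftmost matching position
lemma pvPassA_some (rels : List (List Char)) (w : List Char) (i : Nat) (r : List Char)
    (hi : i < w.length)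
    (hfind : rels.find? (fun x => x.isPrefixOf (w.drop i)) = some r) :
    ∀ d k, k ≤ i → i - k ≤ d →
      (∀ j, k ≤ j → j < i → rels.find? (fun x => x.isPrefixOf (w.drop j)) = none) →
      pvPassA rels w k = some (w.take i ++ w.drop (i + r.length)) := by
  intro d
  induction d with
  | zero =>
    intro k hk hd _
    have : k = i := by omega
    subst this
    rw [pvPassA, dif_pos hi, pvPred_eq, hfind]
  | succ d ih =>
    intro k hk hd hnone
    by_cases hki : k = i
    · subst hki
      rw [pvPassA, dif_pos hi, pvPred_eq, hfind]
    · have hklt : k < i := by omega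
      rw [pvPassA, dif_pos (by omega : k < w.length), pvPred_eq, hnone k le_rfl hklt]
      exact ih (k + 1) (by omega) (by omega) (fun j hj hji => hnone j (by omega) hji)

-- a window that ends before position i is unaffected by the edit at i
lemma pvTakeDropAgree (u v : List Char) (i j c : Nat) (h : u.take i = v.take i)
    (hjc : j + c ≤ i) : (u.drop j).take c = (v.drop j).take c := by
  have key : ∀ (x : List Char), ((x.take i).drop j).take c = (x.drop j).take c := by
    intro x
    rw [List.drop_take, List.take_take]
    congr 1
    omega
  rw [← key u, ← key v, h]

lemma pvTakeDelete (w : List Char) (i k : Nat) (hi : i ≤ w.length) :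
    (w.take i ++ w.drop k).take i = w.take i := by
  rw [List.take_append, List.take_take]
  simp [Nat.min_eq_left hi]

-- main invariant argument: B with scan pointer i (no match left of i) equals A's restart
-- loop, for any match lists that agree on the length of the first match at every position
lemma pvLoopB_eq_loopA (rels : List (List Char)) (ds : List (List Char × Nat)) (M : Nat)
    (hne : ∀ r ∈ rels, 1 ≤ r.length) (hM : ∀ r ∈ rels, r.length ≤ M)
    (hEq : ∀ (w : List Char) (i : Nat),
      (rels.find? (fun r => r.isPrefixOf (w.drop i))).map List.length
        = (ds.find? (fun dm =>
            decide (i + dm.2 ≤ w.length) &&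
              PySem.Chars.isIn ((w.drop i).take dm.2) dm.1)).map Prod.snd) :
    ∀ fb fa w i, i ≤ w.length →
      (∀ j, j < i → rels.find? (fun r => r.isPrefixOf (w.drop j)) = none) →
      (w.length - i) + w.length * M < fb → w.length < fa →
      pvLoopB ds M fb w i = pvLoopA rels fa w := by
  intro fb
  induction fb with
  | zero => intro fa w i _ _ hfb _; omega
  | succ fb ih =>
    intro fa w i hi hinv hfb hfa
    obtain ⟨fa', rfl⟩ : ∃ fa', fa = fa' + 1 := ⟨fa - 1, by omega⟩
    by_cases hlt : i < w.length
    · rw [pvLoopB, if_pos hlt]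
      cases hfindB : ds.find? (fun dm =>
          decide (i + dm.2 ≤ w.length) &&
            PySem.Chars.isIn ((w.drop i).take dm.2) dm.1) with
      | none =>
        have hfindA : rels.find? (fun r => r.isPrefixOf (w.drop i)) = none :=
          Option.map_eq_none_iff.mp (by rw [hEq w i, hfindB]; rfl)
        exact ih (fa' + 1) w (i + 1) (by omega)
          (by
            intro j hj
            by_cases hji : j < i
            · exact hinv j hji
            · have : j = i := by omega
              subst this; exact hfindA)
          (by omega) hfa
      | some dm =>
        dsimp only
        obtain ⟨r, hfindA, hrlen⟩ :
            ∃ r, rels.find? (fun r => r.isPrefixOf (w.drop i)) = some r ∧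
              r.length = dm.2 :=
          Option.map_eq_some_iff.mp (by rw [hEq w i, hfindB]; rfl)
        have hrmem := List.mem_of_find?_eq_some hfindA
        have hr1 := hne r hrmem
        have hrM := hM r hrmem
        have hpass : pvPassA rels w 0 = some (w.take i ++ w.drop (i + r.length)) :=
          pvPassA_some rels w i r hlt hfindA i 0 (by omega) (by omega)
            (fun j _ hji => hinv j hji)
        rw [← hrlen, pvLoopA, hpass]
        dsimp only
        set w' := w.take i ++ w.drop (i + r.length) with hw'
        have hlen' : w'.length = i + (w.length - (i + r.length)) := by
          simp [hw', Nat.min_eq_left (le_of_lt hlt)]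
        have htake : w'.take i = w.take i := pvTakeDelete w i _ (le_of_lt hlt)
        apply ih fa' w' (i + 1 - M) (by omega)
        · -- invariant: no match strictly left of the resume point
          intro j hj
          have hjM : j + M ≤ i := by omega
          have h0 := hinv j (by omega)
          rw [List.find?_eq_none] at h0 ⊢
          intro x hx hpre
          apply h0 x hx
          have heq : (w'.drop j).take x.length = (w.drop j).take x.length :=
            pvTakeDropAgree w' w i j x.length htake (by have := hM x hx; omega)
          rw [List.isPrefixOf_iff_prefix, List.prefix_iff_eq_take] at hpre ⊢
          rw [heq] at hpre
          exact hpre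
        · -- fuel bookkeeping: the potential (len - i) + len*M strictly decreases
          have hmul : w'.length * M + M ≤ w.length * M := by
            calc w'.length * M + M = (w'.length + 1) * M := by ring
            _ ≤ w.length * M := Nat.mul_le_mul_right M (by omega)
          revert hmul hfb
          generalize w.length * M = P
          generalize w'.length * M = P'
          intro hmul hfb
          omega
        · omega
    · rw [pvLoopB, if_neg hlt]
      have : i = w.length := by omega
      subst this
      rw [pvLoopA, pvPassA_none rels w (fun j hj => hinv j hj) (w.length + 1) 0 (by omega)]

-- ===== VERDICT (by name: the statement is the Claim_ definition above) =====
theorem reduce_word_spec : Claim_equal_reduce_word := by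
  intro _rels word _dom
  unfold Spec_reduce_word reduce_word reduce_word_alt
  dsimp only
  rw [pvRelsA_flat]
  apply congrArg String.ofList
  have hfuel : (word.toList.length - 0) + word.toList.length * pvMaxM (pvDoubles _rels)
      < word.toList.length * (pvMaxM (pvDoubles _rels) + 1) + 1 := by
    have h : word.toList.length * (pvMaxM (pvDoubles _rels) + 1)
        = word.toList.length * pvMaxM (pvDoubles _rels) + word.toList.length := by ring
    rw [h]
    generalize word.toList.length * pvMaxM (pvDoubles _rels) = P
    omega
  exact (pvLoopB_eq_loopA (_rels.flatMap (fun rel => pvRots rel.toList)) (pvDoubles _rels)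
    (pvMaxM (pvDoubles _rels)) (pvFlat_pos _rels) (pvFlat_le _rels)
    (fun w i => pvFind_eq _rels w i)
    (word.toList.length * (pvMaxM (pvDoubles _rels) + 1) + 1) (word.toList.length + 1)
    word.toList 0 (Nat.zero_le _) (fun j hj => absurd hj (Nat.not_lt_zero j))
    hfuel (Nat.lt_succ_self _)).symm
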